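-- pv_equiv track=rewrite | github.com/packetloss404/jarvis | legacy/jarvis/commands/detection.py | _is_minesweeper_command
-- ===== SOURCE A (Python) =====
-- def _is_minesweeper_command(text: str) -> bool:
--     """Detect minesweeper game commands."""
--     normalized = text.lower().strip().rstrip(".")
--     minesweeper_phrases = [
--         "minesweeper",
--         "play minesweeper",
--         "launch minesweeper",
--         "open minesweeper",
--         "start minesweeper",
--         "mine sweeper",
--     ]
--     return any(
--         phrase == normalized or normalized.startswith(phrase)
--         for phrase in minesweeper_phrases
--     )
-- ===== SOURCE B (Python) =====
-- def _is_minesweeper_command(text: str) -> bool: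
--     """Detect minesweeper game commands."""
--     n = text.lower().strip().rstrip(".")
--     if n.startswith("mine sweeper"):
--         return True
--     for verb in ("play ", "launch ", "open ", "start "):
--         if n.startswith(verb):
--             n = n[len(verb):]
--             break
--     return n.startswith("minesweeper")
-- ===== Notes on version B (the rewrite author's own statement) =====
-- stated objective: idiomatic
-- what changed: Instead of scanning the six full phrase strings for equality-or-prefix, B strips an optional leading verb token (one of four) from the normalized text and then performs a single fixed prefix test, with a separate check for the bare two-word variant first.
import Mathlib
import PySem

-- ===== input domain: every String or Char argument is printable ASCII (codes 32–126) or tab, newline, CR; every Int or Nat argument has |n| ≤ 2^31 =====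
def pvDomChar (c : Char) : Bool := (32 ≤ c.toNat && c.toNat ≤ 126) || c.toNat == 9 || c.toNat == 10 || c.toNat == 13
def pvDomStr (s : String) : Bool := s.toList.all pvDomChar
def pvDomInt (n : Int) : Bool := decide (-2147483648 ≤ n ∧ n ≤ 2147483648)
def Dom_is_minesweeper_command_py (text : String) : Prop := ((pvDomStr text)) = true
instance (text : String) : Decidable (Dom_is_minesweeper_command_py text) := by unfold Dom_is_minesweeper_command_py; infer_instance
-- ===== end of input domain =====

-- B replaces the six-phrase equality-or-prefix scan by stripping one optional leading verb token and doing a single fixed prefix test (idiomatic; not faster).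

-- str.rstrip(".") : removes trailing '.' characters only (exact hand port; PySem has no right-strip-with-chars primitive)
def pvRstripDot (cs : List Char) : List Char := (cs.reverse.dropWhile (· == '.')).reverse

-- text.lower().strip().rstrip(".") — shared normalization line of both Pythons
def pvNorm (text : String) : List Char := pvRstripDot (PySem.Chars.strip (PySem.Chars.lower text.toList))

-- ===== PORT A =====
def pvCheckA (normalized : List Char) : Bool :=
  let phrases : List (List Char) :=
    ["minesweeper".toList, "play minesweeper".toList, "launch minesweeper".toList,
     "open minesweeper".toList, "start minesweeper".toList, "mine sweeper".toList]
  phrases.any (fun phrase => phrase == normalized || PySem.Chars.startswith normalized phrase)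

def is_minesweeper_command_py (text : String) : Bool := pvCheckA (pvNorm text)

-- ===== PORT B =====
-- the for-loop over the four verbs with break, then the final prefix test; n[len(verb):] is drop of a literal nonnegative index
def pvCheckB (n : List Char) : Bool :=
  if PySem.Chars.startswith n "mine sweeper".toList then true
  else
    let n' :=
      if PySem.Chars.startswith n "play ".toList then n.drop 5
      else if PySem.Chars.startswith n "launch ".toList then n.drop 7
      else if PySem.Chars.startswith n "open ".toList then n.drop 5
      else if PySem.Chars.startswith n "start ".toList then n.drop 6
      else n
    PySem.Chars.startswith n' "minesweeper".toList

def is_minesweeper_command_py_alt (text : String) : Bool := pvCheckB (pvNorm text)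

-- ===== PRECONDITION & SPEC =====
def Spec_is_minesweeper_command_py (text : String) (out : Bool) : Prop := out = is_minesweeper_command_py_alt text
instance (text : String) (out : Bool) : Decidable (Spec_is_minesweeper_command_py text out) := by unfold Spec_is_minesweeper_command_py; infer_instance

-- ===== CLAIM (what is proved, stated in full; the proofs are below) =====
def Claim_equal_is_minesweeper_command_py : Prop := ∀ (text : String), Dom_is_minesweeper_command_py text → Spec_is_minesweeper_command_py text (is_minesweeper_command_py text)

-- ===== LEMMAS AND PROOFS =====

-- two prefixes of the same list have the same head
theorem pv_head_eq {c d : Char} {p q n : List Char}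
    (h1 : (c :: p) <+: n) (h2 : (d :: q) <+: n) : c = d := by
  obtain ⟨t, rfl⟩ := h1
  obtain ⟨u, hu⟩ := h2
  simpa using (congrArg (List.head? ·) hu).symm

theorem pv_prefix_append_iff (a b n : List Char) :
    a ++ b <+: n ↔ a <+: n ∧ b <+: n.drop a.length := by
  constructor
  · intro h
    have ha : a <+: n := (a.prefix_append b).trans h
    obtain ⟨t, rfl⟩ := ha
    refine ⟨a.prefix_append _, ?_⟩
    simpa using (List.prefix_append_right_inj a).mp h
  · rintro ⟨⟨t, rfl⟩, hb⟩
    simp_all [List.prefix_append_right_inj]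

-- the equality disjunct in A is subsumed by startswith
theorem pv_eq_or_sw (p n : List Char) :
    ((p == n) || PySem.Chars.startswith n p) = PySem.Chars.startswith n p := by
  by_cases h : p = n
  · subst h; simp [PySem.Chars.startswith_iff]
  · simp [h]

theorem pv_check_eq (n : List Char) : pvCheckA n = pvCheckB n := by
  simp only [pvCheckA, pvCheckB, List.any_cons, List.any_nil, pv_eq_or_sw, Bool.or_false]
  rw [Bool.eq_iff_iff]
  rw [show "play minesweeper".toList = "play ".toList ++ "minesweeper".toList from rfl,
      show "launch minesweeper".toList = "launch ".toList ++ "minesweeper".toList from rfl,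
      show "open minesweeper".toList = "open ".toList ++ "minesweeper".toList from rfl,
      show "start minesweeper".toList = "start ".toList ++ "minesweeper".toList from rfl]
  simp only [Bool.or_eq_true, PySem.Chars.startswith_iff, pv_prefix_append_iff]
  by_cases hms : ['m','i','n','e',' ','s','w','e','e','p','e','r'] <+: n
  · simp [hms]
  · by_cases hp : ['p','l','a','y',' '] <+: n
    · have h1 : ¬ ['m','i','n','e','s','w','e','e','p','e','r'] <+: n := fun h => by
        have := pv_head_eq (c := 'm') (d := 'p') h hp; simp at this
      have h2 : ¬ ['l','a','u','n','c','h',' '] <+: n := fun h => by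
        have := pv_head_eq (c := 'l') (d := 'p') h hp; simp at this
      have h3 : ¬ ['o','p','e','n',' '] <+: n := fun h => by
        have := pv_head_eq (c := 'o') (d := 'p') h hp; simp at this
      have h4 : ¬ ['s','t','a','r','t',' '] <+: n := fun h => by
        have := pv_head_eq (c := 's') (d := 'p') h hp; simp at this
      simp [hms, hp, h1, h2, h3, h4, PySem.Chars.startswith_iff]
    · by_cases hl : ['l','a','u','n','c','h',' '] <+: n
      · have h1 : ¬ ['m','i','n','e','s','w','e','e','p','e','r'] <+: n := fun h => by
          have := pv_head_eq (c := 'm') (d := 'l') h hl; simp at this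
        have h3 : ¬ ['o','p','e','n',' '] <+: n := fun h => by
          have := pv_head_eq (c := 'o') (d := 'l') h hl; simp at this
        have h4 : ¬ ['s','t','a','r','t',' '] <+: n := fun h => by
          have := pv_head_eq (c := 's') (d := 'l') h hl; simp at this
        simp [hms, hp, hl, h1, h3, h4, PySem.Chars.startswith_iff]
      · by_cases ho : ['o','p','e','n',' '] <+: n
        · have h1 : ¬ ['m','i','n','e','s','w','e','e','p','e','r'] <+: n := fun h => by
            have := pv_head_eq (c := 'm') (d := 'o') h ho; simp at this
          have h4 : ¬ ['s','t','a','r','t',' '] <+: n := fun h => by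
            have := pv_head_eq (c := 's') (d := 'o') h ho; simp at this
          simp [hms, hp, hl, ho, h1, h4, PySem.Chars.startswith_iff]
        · by_cases hs : ['s','t','a','r','t',' '] <+: n
          · have h1 : ¬ ['m','i','n','e','s','w','e','e','p','e','r'] <+: n := fun h => by
              have := pv_head_eq (c := 'm') (d := 's') h hs; simp at this
            simp [hms, hp, hl, ho, hs, h1, PySem.Chars.startswith_iff]
          · simp [hms, hp, hl, ho, hs, PySem.Chars.startswith_iff]

-- ===== VERDICT (by name: the statement is the Claim_ definition above) =====
theorem is_minesweeper_command_py_spec : Claim_equal_is_minesweeper_command_py := by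
  intro text _
  unfold Spec_is_minesweeper_command_py is_minesweeper_command_py is_minesweeper_command_py_alt
  exact pv_check_eq (pvNorm text)
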